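-- pv_equiv track=rewrite | github.com/Darkhouse13/VerveQ | web_server.py | filter_questions_by_difficulty
-- ===== SOURCE A (Python) =====
-- from typing import List, Dict, Any, Optional
--
-- def filter_questions_by_difficulty(questions: List[Dict[str, Any]], difficulty: str) -> List[Dict[str, Any]]:
--     """Filter and prioritize questions based on difficulty level"""
--     if difficulty == 'casual':
--         # Casual mode: prefer easier question types and well-known subjects
--         easy_types = ['award_nationality', 'award_position', 'stat_team', 'stat_leader']
--         medium_types = ['award_winner', 'award_team', 'who_am_i']
--
--         # Prioritize easy questions, then medium
--         easy_questions = [q for q in questions if q.get('type') in easy_types]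
--         medium_questions = [q for q in questions if q.get('type') in medium_types]
--         hard_questions = [q for q in questions if q.get('type') not in easy_types + medium_types]
--
--         # Return in order of preference for casual mode
--         return easy_questions + medium_questions + hard_questions
--
--     else:  # diehard mode
--         # Die hard mode: prefer harder question types and obscure facts
--         hard_types = ['award_season', 'award_age', 'stat_value', 'stat_comparison', 'who_am_i']
--         medium_types = ['award_winner', 'award_team', 'stat_leader']
--
--         # Prioritize hard questions, then medium, then easy
--         hard_questions = [q for q in questions if q.get('type') in hard_types]
--         medium_questions = [q for q in questions if q.get('type') in medium_types]
--         easy_questions = [q for q in questions if q.get('type') not in hard_types + medium_types]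
--
--         # Return in order of preference for die hard mode
--         return hard_questions + medium_questions + easy_questions
-- ===== SOURCE B (Python) =====
-- def filter_questions_by_difficulty(questions, difficulty):
--     """Filter and prioritize questions based on difficulty level"""
--     if difficulty == 'casual':
--         priority = {'award_nationality': 0, 'award_position': 0, 'stat_team': 0, 'stat_leader': 0,
--                     'award_winner': 1, 'award_team': 1, 'who_am_i': 1}
--     else:
--         priority = {'award_season': 0, 'award_age': 0, 'stat_value': 0, 'stat_comparison': 0, 'who_am_i': 0,
--                     'award_winner': 1, 'award_team': 1, 'stat_leader': 1}
--     return sorted(questions, key=lambda q: priority.get(q.get('type'), 2))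
-- ===== Notes on version B (the rewrite author's own statement) =====
-- stated objective: alternative
-- what changed: Replaces A's three separate filter passes and list concatenation by a single stable sort keyed by a precomputed type-to-rank dictionary (rank 0/1/2, unknown or missing types default to 2), relying on sort stability to reproduce the exact concatenation order.
import Mathlib
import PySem

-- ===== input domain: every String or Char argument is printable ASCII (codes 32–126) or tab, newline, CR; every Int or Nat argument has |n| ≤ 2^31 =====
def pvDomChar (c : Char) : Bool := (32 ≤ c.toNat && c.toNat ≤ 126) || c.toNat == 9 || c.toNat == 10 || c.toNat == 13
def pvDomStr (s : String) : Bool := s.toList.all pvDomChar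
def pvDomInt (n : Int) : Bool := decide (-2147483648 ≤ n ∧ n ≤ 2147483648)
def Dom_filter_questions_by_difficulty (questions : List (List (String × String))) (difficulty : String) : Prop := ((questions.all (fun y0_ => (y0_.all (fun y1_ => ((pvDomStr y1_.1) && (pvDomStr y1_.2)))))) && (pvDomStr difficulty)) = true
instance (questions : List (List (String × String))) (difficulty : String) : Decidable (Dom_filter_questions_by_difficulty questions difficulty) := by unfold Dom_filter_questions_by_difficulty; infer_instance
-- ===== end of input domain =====

-- B replaces A's three list-comprehension passes and concatenation by ONE stable sort keyed by a
-- precomputed type→rank dictionary (rank 0/1/2); same return value, different algorithm.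

-- ===== PORT A =====
-- q.get('type') : first-match lookup in the association list (Python dict.get)
def pvGetType (q : List (String × String)) : Option String :=
  (q.find? (fun p => p.1 == "type")).map (·.2)

-- "q.get('type') in ts" : None is never in a list of strings
def pvTypeIn (q : List (String × String)) (ts : List String) : Bool :=
  match pvGetType q with
  | some t => ts.contains t
  | none => false

def filter_questions_by_difficulty (questions : List (List (String × String))) (difficulty : String) : List (List (String × String)) :=
  if difficulty = "casual" then
    let easy_types := ["award_nationality", "award_position", "stat_team", "stat_leader"]
    let medium_types := ["award_winner", "award_team", "who_am_i"]
    let easy_questions := questions.filter (fun q => pvTypeIn q easy_types)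
    let medium_questions := questions.filter (fun q => pvTypeIn q medium_types)
    let hard_questions := questions.filter (fun q => !(pvTypeIn q (easy_types ++ medium_types)))
    easy_questions ++ medium_questions ++ hard_questions
  else
    let hard_types := ["award_season", "award_age", "stat_value", "stat_comparison", "who_am_i"]
    let medium_types := ["award_winner", "award_team", "stat_leader"]
    let hard_questions := questions.filter (fun q => pvTypeIn q hard_types)
    let medium_questions := questions.filter (fun q => pvTypeIn q medium_types)
    let easy_questions := questions.filter (fun q => !(pvTypeIn q (hard_types ++ medium_types)))
    hard_questions ++ medium_questions ++ easy_questions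

-- ===== PORT B =====
def pvCasualPriority : PySem.Dict String Int :=
  PySem.Dict.ofList [("award_nationality", 0), ("award_position", 0), ("stat_team", 0), ("stat_leader", 0),
                     ("award_winner", 1), ("award_team", 1), ("who_am_i", 1)]

def pvDiehardPriority : PySem.Dict String Int :=
  PySem.Dict.ofList [("award_season", 0), ("award_age", 0), ("stat_value", 0), ("stat_comparison", 0), ("who_am_i", 0),
                     ("award_winner", 1), ("award_team", 1), ("stat_leader", 1)]

-- priority.get(q.get('type'), 2)
def pvRank (priority : PySem.Dict String Int) (q : List (String × String)) : Int :=
  match pvGetType q with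
  | some t => priority.getD t 2
  | none => 2

def filter_questions_by_difficulty_alt (questions : List (List (String × String))) (difficulty : String) : List (List (String × String)) :=
  let priority := if difficulty = "casual" then pvCasualPriority else pvDiehardPriority
  PySem.List.sorted questions (pvRank priority) false

-- ===== PRECONDITION & SPEC =====
def Spec_filter_questions_by_difficulty (questions : List (List (String × String))) (difficulty : String) (out : List (List (String × String))) : Prop := out = filter_questions_by_difficulty_alt questions difficulty
instance (questions : List (List (String × String))) (difficulty : String) (out : List (List (String × String))) : Decidable (Spec_filter_questions_by_difficulty questions difficulty out) := by unfold Spec_filter_questions_by_difficulty; infer_instance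

-- ===== CLAIM (what is proved, stated in full; the proofs are below) =====
def Claim_equal_filter_questions_by_difficulty : Prop := ∀ (questions : List (List (String × String))) (difficulty : String), Dom_filter_questions_by_difficulty questions difficulty → Spec_filter_questions_by_difficulty questions difficulty (filter_questions_by_difficulty questions difficulty)

-- ===== LEMMAS AND PROOFS =====

-- inserting past a block of elements it does not go before
lemma insertBy_append_not {α : Type} (before : α → α → Bool) (x : α) (ys zs : List α)
    (h : ∀ y ∈ ys, before x y = false) :
    PySem.List.insertBy before x (ys ++ zs) = ys ++ PySem.List.insertBy before x zs := by
  induction ys with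
  | nil => simp
  | cons y ys ih =>
    have hy := h y (by simp)
    simp [PySem.List.insertBy, hy]
    exact ih (fun y hy => h y (by simp [hy]))

-- inserting in front of a block it goes before every element of
lemma insertBy_all_before {α : Type} (before : α → α → Bool) (x : α) (zs : List α)
    (h : ∀ z ∈ zs, before x z = true) :
    PySem.List.insertBy before x zs = x :: zs := by
  cases zs with
  | nil => rfl
  | cons z zs => simp [PySem.List.insertBy, h z (by simp)]

-- a stable sort by a {0,1,2}-valued key is the concatenation of the three key classes in order
lemma sorted_three_classes {α : Type} (xs : List α) (k : α → Int)
    (hk : ∀ x, k x = 0 ∨ k x = 1 ∨ k x = 2) :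
    PySem.List.sorted xs k false =
      xs.filter (fun x => decide (k x = 0)) ++ xs.filter (fun x => decide (k x = 1))
        ++ xs.filter (fun x => decide (k x = 2)) := by
  rw [PySem.List.sorted_eq_foldl_insertBy]
  induction xs using List.reverseRecOn with
  | nil => simp
  | append_singleton xs x ih =>
    rw [List.foldl_append, List.foldl_cons, List.foldl_nil, ih]
    have hmem0 : ∀ z ∈ xs.filter (fun x => decide (k x = 0)), k z = 0 := by
      intro z hz; simpa using (List.of_mem_filter hz)
    have hmem1 : ∀ z ∈ xs.filter (fun x => decide (k x = 1)), k z = 1 := by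
      intro z hz; simpa using (List.of_mem_filter hz)
    have hmem2 : ∀ z ∈ xs.filter (fun x => decide (k x = 2)), k z = 2 := by
      intro z hz; simpa using (List.of_mem_filter hz)
    rcases hk x with h0 | h1 | h2
    · rw [List.append_assoc,
        insertBy_append_not _ _ _ _ (by intro y hy; simp [hmem0 y hy, h0]),
        insertBy_all_before _ _ _ (by
          intro z hz
          rcases List.mem_append.mp hz with hz | hz
          · simp [hmem1 z hz, h0]
          · simp [hmem2 z hz, h0])]
      simp [h0, List.filter_append]
    · rw [insertBy_append_not _ _ _ _ (by
          intro y hy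
          rcases List.mem_append.mp hy with hy | hy
          · simp [hmem0 y hy, h1]
          · simp [hmem1 y hy, h1]),
        insertBy_all_before _ _ _ (by intro z hz; simp [hmem2 z hz, h1])]
      simp [h1, List.filter_append]
    · rw [PySem.List.insertBy_of_forall_not_before _ _ _ (by
          intro y hy
          rcases List.mem_append.mp hy with hy' | hy
          · rcases List.mem_append.mp hy' with hy | hy
            · simp [hmem0 y hy, h2]
            · simp [hmem1 y hy, h2]
          · simp [hmem2 y hy, h2])]
      simp [h2, List.filter_append]

lemma pvCasualPriority_mk : pvCasualPriority = PySem.Dict.mk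
    [("award_nationality", 0), ("award_position", 0), ("stat_team", 0), ("stat_leader", 0),
     ("award_winner", 1), ("award_team", 1), ("who_am_i", 1)] := by decide

lemma pvDiehardPriority_mk : pvDiehardPriority = PySem.Dict.mk
    [("award_season", 0), ("award_age", 0), ("stat_value", 0), ("stat_comparison", 0), ("who_am_i", 0),
     ("award_winner", 1), ("award_team", 1), ("stat_leader", 1)] := by decide

lemma casual_getD_default (t : String) (h1 : ¬ t = "award_nationality") (h2 : ¬ t = "award_position")
    (h3 : ¬ t = "stat_team") (h4 : ¬ t = "stat_leader") (h5 : ¬ t = "award_winner")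
    (h6 : ¬ t = "award_team") (h7 : ¬ t = "who_am_i") :
    PySem.Dict.getD pvCasualPriority t 2 = 2 := by
  simp [pvCasualPriority_mk, PySem.Dict.getD_eq_get?_getD, PySem.Dict.get?,
    Ne.symm h1, Ne.symm h2, Ne.symm h3, Ne.symm h4, Ne.symm h5, Ne.symm h6, Ne.symm h7]

lemma diehard_getD_default (t : String) (h1 : ¬ t = "award_season") (h2 : ¬ t = "award_age")
    (h3 : ¬ t = "stat_value") (h4 : ¬ t = "stat_comparison") (h5 : ¬ t = "who_am_i")
    (h6 : ¬ t = "award_winner") (h7 : ¬ t = "award_team") (h8 : ¬ t = "stat_leader") :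
    PySem.Dict.getD pvDiehardPriority t 2 = 2 := by
  simp [pvDiehardPriority_mk, PySem.Dict.getD_eq_get?_getD, PySem.Dict.get?,
    Ne.symm h1, Ne.symm h2, Ne.symm h3, Ne.symm h4, Ne.symm h5, Ne.symm h6, Ne.symm h7, Ne.symm h8]

lemma rank_casual_cases (q : List (String × String)) :
    pvRank pvCasualPriority q = 0 ∨ pvRank pvCasualPriority q = 1 ∨ pvRank pvCasualPriority q = 2 := by
  unfold pvRank
  cases h : pvGetType q with
  | none => simp
  | some t =>
    by_cases h1 : t = "award_nationality"
    · subst h1; decide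
    by_cases h2 : t = "award_position"
    · subst h2; decide
    by_cases h3 : t = "stat_team"
    · subst h3; decide
    by_cases h4 : t = "stat_leader"
    · subst h4; decide
    by_cases h5 : t = "award_winner"
    · subst h5; decide
    by_cases h6 : t = "award_team"
    · subst h6; decide
    by_cases h7 : t = "who_am_i"
    · subst h7; decide
    simp [casual_getD_default t h1 h2 h3 h4 h5 h6 h7]

lemma rank_diehard_cases (q : List (String × String)) :
    pvRank pvDiehardPriority q = 0 ∨ pvRank pvDiehardPriority q = 1 ∨ pvRank pvDiehardPriority q = 2 := by
  unfold pvRank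
  cases h : pvGetType q with
  | none => simp
  | some t =>
    by_cases h1 : t = "award_season"
    · subst h1; decide
    by_cases h2 : t = "award_age"
    · subst h2; decide
    by_cases h3 : t = "stat_value"
    · subst h3; decide
    by_cases h4 : t = "stat_comparison"
    · subst h4; decide
    by_cases h5 : t = "who_am_i"
    · subst h5; decide
    by_cases h6 : t = "award_winner"
    · subst h6; decide
    by_cases h7 : t = "award_team"
    · subst h7; decide
    by_cases h8 : t = "stat_leader"
    · subst h8; decide
    simp [diehard_getD_default t h1 h2 h3 h4 h5 h6 h7 h8]

lemma bridge_casual (q : List (String × String)) :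
    pvTypeIn q ["award_nationality", "award_position", "stat_team", "stat_leader"]
        = decide (pvRank pvCasualPriority q = 0)
  ∧ pvTypeIn q ["award_winner", "award_team", "who_am_i"]
        = decide (pvRank pvCasualPriority q = 1)
  ∧ (!(pvTypeIn q (["award_nationality", "award_position", "stat_team", "stat_leader"]
        ++ ["award_winner", "award_team", "who_am_i"])))
        = decide (pvRank pvCasualPriority q = 2) := by
  unfold pvTypeIn pvRank
  cases h : pvGetType q with
  | none => simp
  | some t =>
    by_cases h1 : t = "award_nationality"
    · subst h1; decide
    by_cases h2 : t = "award_position"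
    · subst h2; decide
    by_cases h3 : t = "stat_team"
    · subst h3; decide
    by_cases h4 : t = "stat_leader"
    · subst h4; decide
    by_cases h5 : t = "award_winner"
    · subst h5; decide
    by_cases h6 : t = "award_team"
    · subst h6; decide
    by_cases h7 : t = "who_am_i"
    · subst h7; decide
    simp [List.contains_eq_mem, h1, h2, h3, h4, h5, h6, h7,
      casual_getD_default t h1 h2 h3 h4 h5 h6 h7]

lemma bridge_diehard (q : List (String × String)) :
    pvTypeIn q ["award_season", "award_age", "stat_value", "stat_comparison", "who_am_i"]
        = decide (pvRank pvDiehardPriority q = 0)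
  ∧ pvTypeIn q ["award_winner", "award_team", "stat_leader"]
        = decide (pvRank pvDiehardPriority q = 1)
  ∧ (!(pvTypeIn q (["award_season", "award_age", "stat_value", "stat_comparison", "who_am_i"]
        ++ ["award_winner", "award_team", "stat_leader"])))
        = decide (pvRank pvDiehardPriority q = 2) := by
  unfold pvTypeIn pvRank
  cases h : pvGetType q with
  | none => simp
  | some t =>
    by_cases h1 : t = "award_season"
    · subst h1; decide
    by_cases h2 : t = "award_age"
    · subst h2; decide
    by_cases h3 : t = "stat_value"
    · subst h3; decide
    by_cases h4 : t = "stat_comparison"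
    · subst h4; decide
    by_cases h5 : t = "who_am_i"
    · subst h5; decide
    by_cases h6 : t = "award_winner"
    · subst h6; decide
    by_cases h7 : t = "award_team"
    · subst h7; decide
    by_cases h8 : t = "stat_leader"
    · subst h8; decide
    simp [List.contains_eq_mem, h1, h2, h3, h4, h5, h6, h7, h8,
      diehard_getD_default t h1 h2 h3 h4 h5 h6 h7 h8]

-- ===== VERDICT (by name: the statement is the Claim_ definition above) =====
theorem filter_questions_by_difficulty_spec : Claim_equal_filter_questions_by_difficulty := by
  intro questions difficulty _
  unfold Spec_filter_questions_by_difficulty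
  unfold filter_questions_by_difficulty filter_questions_by_difficulty_alt
  by_cases hd : difficulty = "casual" <;> simp only [hd, if_pos, ite_false]
  · rw [sorted_three_classes questions _ rank_casual_cases]
    rw [List.filter_congr (fun q _ => (bridge_casual q).1),
      List.filter_congr (fun q _ => (bridge_casual q).2.1),
      List.filter_congr (fun q _ => (bridge_casual q).2.2)]
  · rw [sorted_three_classes questions _ rank_diehard_cases]
    rw [List.filter_congr (fun q _ => (bridge_diehard q).1),
      List.filter_congr (fun q _ => (bridge_diehard q).2.1),
      List.filter_congr (fun q _ => (bridge_diehard q).2.2)]
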